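-- pv_equiv track=rewrite | github.com/cmillstead/coding-team | hooks/deny-list-audit.py | check_deny_coverage
-- ===== SOURCE A (Python) =====
-- REQUIRED_DENY_PATTERNS = [
--     "~/.ssh",
--     "~/.aws",
--     "~/.config/gcloud",
--     "~/.kube",
--     "~/.azure",
--     "~/Library/Keychains",
--     "~/.password-store",
--     "~/.gnupg",
-- ]
--
-- def check_deny_coverage(deny_list: list[str]) -> list[str]:
--     """Check which required patterns are missing from the deny list.
--
--     Returns list of missing pattern descriptions.
--     """
--     # Normalize deny list entries for matching
--     deny_text = " ".join(deny_list).lower()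
--
--     missing = []
--     for pattern in REQUIRED_DENY_PATTERNS:
--         # Check if the pattern appears in any deny entry
--         # Normalize: ~/.ssh -> .ssh, ~/Library -> Library
--         key = pattern.lstrip("~/").lower()
--         if key not in deny_text:
--             missing.append(pattern)
--
--     return missing
-- ===== SOURCE B (Python) =====
-- REQUIRED_DENY_PATTERNS = [
--     "~/.ssh",
--     "~/.aws",
--     "~/.config/gcloud",
--     "~/.kube",
--     "~/.azure",
--     "~/Library/Keychains",
--     "~/.password-store",
--     "~/.gnupg",
-- ]
--
-- def check_deny_coverage(deny_list: list[str]) -> list[str]: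
--     """Check which required patterns are missing from the deny list.
--
--     Returns list of missing pattern descriptions.
--     """
--     lowered = [entry.lower() for entry in deny_list]
--     return [
--         pattern
--         for pattern in REQUIRED_DENY_PATTERNS
--         if not any(pattern.lstrip("~/").lower() in entry for entry in lowered)
--     ]
-- ===== Notes on version B (the rewrite author's own statement) =====
-- stated objective: alternative
-- what changed: B drops A's build-one-joined-lowercased-string-then-substring-search strategy: it lowercases each entry once and filters the required patterns by testing each normalized key against the individual entries with any(); equivalence rests on the fact that no normalized key contains a space, so a match in A's joined text cannot span the join separator.
import Mathlib
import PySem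

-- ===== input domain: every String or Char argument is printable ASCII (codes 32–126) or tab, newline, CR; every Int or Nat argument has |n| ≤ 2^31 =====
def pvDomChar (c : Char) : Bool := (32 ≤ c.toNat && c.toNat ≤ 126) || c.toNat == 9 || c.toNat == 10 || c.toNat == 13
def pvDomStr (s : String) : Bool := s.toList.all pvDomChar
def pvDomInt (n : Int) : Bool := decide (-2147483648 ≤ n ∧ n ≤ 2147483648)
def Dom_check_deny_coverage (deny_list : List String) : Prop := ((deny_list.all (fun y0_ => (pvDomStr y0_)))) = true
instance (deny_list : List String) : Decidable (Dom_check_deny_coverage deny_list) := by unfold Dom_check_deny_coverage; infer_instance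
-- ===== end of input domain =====

-- B replaces A's "join all entries into one lowercased string, then substring-search it"
-- strategy by lowercasing each entry once and filtering the required patterns with an
-- any() test against the individual entries (alternative decomposition; equivalence
-- rests on no normalized key containing a space, so a match cannot span A's separator).

-- ===== PORT A =====

-- exact hand port of Python's s.lstrip("~/"): drop leading characters from the set {'~','/'}
def pvLstripTildeSlash (s : String) : String :=
  String.ofList (s.toList.dropWhile (fun c => c == '~' || c == '/'))

def REQUIRED_DENY_PATTERNS : List String :=
  ["~/.ssh", "~/.aws", "~/.config/gcloud", "~/.kube", "~/.azure",
   "~/Library/Keychains", "~/.password-store", "~/.gnupg"]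

def check_deny_coverage (deny_list : List String) : List String :=
  let deny_text := PySem.Str.lower (PySem.Str.join " " deny_list)
  REQUIRED_DENY_PATTERNS.foldl (fun missing pattern =>
    let key := PySem.Str.lower (pvLstripTildeSlash pattern)
    if !(PySem.Str.isIn key deny_text) then missing ++ [pattern] else missing) []

-- ===== PORT B =====
def check_deny_coverage_alt (deny_list : List String) : List String :=
  let lowered := deny_list.map (fun entry => PySem.Str.lower entry)
  REQUIRED_DENY_PATTERNS.filter (fun pattern =>
    !(lowered.any (fun entry =>
        PySem.Str.isIn (PySem.Str.lower (pvLstripTildeSlash pattern)) entry)))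

-- ===== PRECONDITION & SPEC =====
def Spec_check_deny_coverage (deny_list : List String) (out : List String) : Prop := out = check_deny_coverage_alt deny_list
instance (deny_list : List String) (out : List String) : Decidable (Spec_check_deny_coverage deny_list out) := by unfold Spec_check_deny_coverage; infer_instance

-- ===== CLAIM (what is proved, stated in full; the proofs are below) =====
def Claim_equal_check_deny_coverage : Prop := ∀ (deny_list : List String), Dom_check_deny_coverage deny_list → Spec_check_deny_coverage deny_list (check_deny_coverage deny_list)

-- ===== LEMMAS AND PROOFS =====

lemma pv_drop_append_mid (a b : List Char) (c : Char) (j : Nat) :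
    (a ++ c :: b).drop (a.length + (1 + j)) = b.drop j := by
  rw [List.drop_append]
  have h1 : a.drop (a.length + (1 + j)) = [] := List.drop_eq_nil_of_le (by omega)
  have h2 : a.length + (1 + j) - a.length = 1 + j := by omega
  rw [h1, h2]
  simp [List.drop_succ_cons, Nat.add_comm]

-- a substring that avoids a character cannot straddle an occurrence of that character
lemma pv_prefix_append_cons {sub a b : List Char} {c : Char} (hc : c ∉ sub)
    (h : sub <+: a ++ c :: b) : sub <+: a := by
  rcases Nat.lt_or_ge a.length sub.length with hlt | hle
  · exfalso
    obtain ⟨t, ht⟩ := h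
    have h1 : (sub ++ t)[a.length]? = sub[a.length]? := List.getElem?_append_left hlt
    have h2 : (a ++ c :: b)[a.length]? = some c := by simp
    rw [ht, h2] at h1
    exact hc (List.mem_of_getElem? h1.symm)
  · exact List.prefix_of_prefix_length_le h (a.prefix_append _) hle

lemma pv_isIn_append_cons (sub a b : List Char) (c : Char) (hc : c ∉ sub) :
    PySem.Chars.isIn sub (a ++ c :: b) = (PySem.Chars.isIn sub a || PySem.Chars.isIn sub b) := by
  rw [Bool.eq_iff_iff]
  simp only [Bool.or_eq_true]
  rw [← PySem.Chars.exists_prefix_drop_iff_isIn, ← PySem.Chars.exists_prefix_drop_iff_isIn,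
      ← PySem.Chars.exists_prefix_drop_iff_isIn]
  constructor
  · rintro ⟨j, hj⟩
    rcases Nat.lt_or_ge a.length j with hlt | hle
    · refine Or.inr ⟨j - a.length - 1, ?_⟩
      have he : j = a.length + (1 + (j - a.length - 1)) := by omega
      rw [he, pv_drop_append_mid] at hj
      exact hj
    · rw [List.drop_append_of_le_length hle] at hj
      exact Or.inl ⟨j, pv_prefix_append_cons hc hj⟩
  · rintro (⟨j, hj⟩ | ⟨j, hj⟩)
    · rcases Nat.lt_or_ge a.length j with hlt | hle
      · have hnil : a.drop j = [] := List.drop_eq_nil_of_le (by omega)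
        rw [hnil] at hj
        have hsub : sub = [] := List.prefix_nil.mp hj
        exact ⟨0, by simp [hsub]⟩
      · exact ⟨j, by rw [List.drop_append_of_le_length hle]; exact hj.trans (List.prefix_append _ _)⟩
    · exact ⟨a.length + (1 + j), by rw [pv_drop_append_mid]; exact hj⟩

-- searching the lowercased space-joined text = searching each lowercased entry,
-- for a nonempty key containing no space
lemma pv_isIn_lower_join (sub : List Char) (h1 : sub ≠ []) (h2 : ' ' ∉ sub)
    (xs : List (List Char)) :
    PySem.Chars.isIn sub (PySem.Chars.lower (PySem.Chars.join [' '] xs))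
      = xs.any (fun e => PySem.Chars.isIn sub (PySem.Chars.lower e)) := by
  induction xs with
  | nil =>
    show PySem.Chars.isIn sub (PySem.Chars.lower (PySem.Chars.join [' '] [])) = false
    rw [PySem.Chars.join_nil]
    refine (PySem.Chars.isIn_eq_false_iff _ _).mpr ?_
    intro h
    exact h1 (List.eq_nil_of_infix_nil h)
  | cons x xs ih =>
    cases xs with
    | nil =>
      simp [PySem.Chars.join_singleton]
    | cons y l =>
      rw [PySem.Chars.join_cons_cons]
      have hl : PySem.Chars.lower (x ++ [' '] ++ PySem.Chars.join [' '] (y :: l))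
          = PySem.Chars.lower x ++ ' ' :: PySem.Chars.lower (PySem.Chars.join [' '] (y :: l)) := by
        show List.map _ _ = _
        simp [PySem.Chars.lower]
        rfl
      rw [hl, pv_isIn_append_cons sub _ _ ' ' h2, ih]
      simp

-- the same fact on the String side, in the shape both ports use
lemma pv_key_cond (key : String) (h1 : key.toList ≠ []) (h2 : ' ' ∉ key.toList)
    (deny_list : List String) :
    PySem.Str.isIn key (PySem.Str.lower (PySem.Str.join " " deny_list))
      = deny_list.any (fun e => PySem.Str.isIn key (PySem.Str.lower e)) := by
  have hb : (PySem.Str.lower (PySem.Str.join " " deny_list)).toList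
      = PySem.Chars.lower (PySem.Chars.join [' '] (deny_list.map String.toList)) := by
    simp
  rw [PySem.Str.isIn_eq, hb, pv_isIn_lower_join key.toList h1 h2]
  simp [List.any_map, PySem.Str.isIn_eq]
  rfl

-- ===== VERDICT (by name: the statement is the Claim_ definition above) =====
theorem check_deny_coverage_spec : Claim_equal_check_deny_coverage := by
  intro deny_list _
  unfold Spec_check_deny_coverage
  show REQUIRED_DENY_PATTERNS.foldl (fun missing pattern =>
      if (!(PySem.Str.isIn (PySem.Str.lower (pvLstripTildeSlash pattern))
            (PySem.Str.lower (PySem.Str.join " " deny_list)))) = true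
      then missing ++ [id pattern] else missing) []
    = check_deny_coverage_alt deny_list
  rw [PySem.List.foldl_append_if, List.nil_append, List.map_id]
  unfold check_deny_coverage_alt
  apply List.filter_congr
  intro p hp
  have hany : (deny_list.map (fun entry => PySem.Str.lower entry)).any
      (fun entry => PySem.Str.isIn (PySem.Str.lower (pvLstripTildeSlash p)) entry)
    = deny_list.any (fun e => PySem.Str.isIn (PySem.Str.lower (pvLstripTildeSlash p)) (PySem.Str.lower e)) := by
    rw [List.any_map]; rfl
  rw [hany, ← pv_key_cond (PySem.Str.lower (pvLstripTildeSlash p)) ?_ ?_ deny_list]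
  · fin_cases hp <;> decide
  · fin_cases hp <;> decide
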